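-- pv_equiv track=rewrite | github.com/Brian-Baros/SarahMemory | SarahMemoryLyricsToSong.py | detect_lyric_structure
-- ===== SOURCE A (Python) =====
-- from typing import Dict, List, Tuple, Optional, Any, Union
--
-- def detect_lyric_structure(lines: List[str]) -> Dict[str, List[int]]:
--     """
--     Detect verse, chorus, bridge structure in lyrics
--     Returns dictionary mapping structure type to line indices
--     """
--     structure = {
--         'verse': [],
--         'chorus': [],
--         'bridge': [],
--         'other': [],
--     }
--
--     # Simple heuristic: repeated lines are likely chorus
--     line_counts = {}
--     for i, line in enumerate(lines):
--         line_lower = line.lower()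
--         if line_lower not in line_counts:
--             line_counts[line_lower] = []
--         line_counts[line_lower].append(i)
--
--     # Lines that appear multiple times are likely chorus
--     for line_lower, indices in line_counts.items():
--         if len(indices) >= 2:
--             structure['chorus'].extend(indices)
--         elif len(indices) == 1:
--             structure['verse'].append(indices[0])
--
--     # Sort indices
--     for key in structure:
--         structure[key] = sorted(structure[key])
--
--     return structure
-- ===== SOURCE B (Python) =====
-- def detect_lyric_structure(lines):
--     """Detect verse/chorus structure: one counting pass, then one classification
--     pass over the lines in index order -- no grouping dict, no final sort."""
--     counts = {}
--     for line in lines: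
--         key = line.lower()
--         counts[key] = counts.get(key, 0) + 1
--     structure = {'verse': [], 'chorus': [], 'bridge': [], 'other': []}
--     for i, line in enumerate(lines):
--         if counts[line.lower()] >= 2:
--             structure['chorus'].append(i)
--         else:
--             structure['verse'].append(i)
--     return structure
-- ===== Notes on version B (the rewrite author's own statement) =====
-- stated objective: simpler
-- what changed: B builds a plain count of lowercased lines and then classifies indices in a single pass over the original list in index order, so A's grouped index-list dict, its pass over the grouped items and its final per-key sorting loop all disappear.
import Mathlib
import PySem

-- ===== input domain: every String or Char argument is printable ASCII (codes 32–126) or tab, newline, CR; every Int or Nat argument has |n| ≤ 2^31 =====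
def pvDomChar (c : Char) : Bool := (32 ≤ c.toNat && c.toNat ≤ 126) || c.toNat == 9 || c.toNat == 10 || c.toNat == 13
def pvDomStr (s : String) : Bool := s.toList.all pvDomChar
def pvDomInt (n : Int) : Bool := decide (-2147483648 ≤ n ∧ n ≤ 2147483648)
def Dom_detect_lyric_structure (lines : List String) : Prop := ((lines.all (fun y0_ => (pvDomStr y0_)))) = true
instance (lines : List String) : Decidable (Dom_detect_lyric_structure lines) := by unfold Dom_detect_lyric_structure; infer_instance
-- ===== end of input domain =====

-- B replaces A's group-then-classify-then-sort with one count pass and one in-order classification pass (objective: simpler).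

-- ===== PORT A =====
def detect_lyric_structure (lines : List String) : List (String × List Int) :=
  let structure0 : PySem.Dict String (List Int) :=
    ((((PySem.Dict.empty).insert "verse" []).insert "chorus" []).insert "bridge" []).insert "other" []
  let line_counts : PySem.Dict String (List Int) :=
    (PySem.List.enumerate lines).foldl (fun d p =>
      let ll := PySem.Str.lower p.2
      let d' := if d.contains ll then d else d.insert ll ([] : List Int)
      d'.modify ll [] (fun xs => xs ++ [p.1])) PySem.Dict.empty
  let structure1 : PySem.Dict String (List Int) :=
    line_counts.items.foldl (fun st kv =>
      if kv.2.length ≥ 2 then st.modify "chorus" [] (fun xs => xs ++ kv.2)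
      else if kv.2.length = 1 then st.modify "verse" [] (fun xs => xs ++ [kv.2.headI])  -- indices[0]; list nonempty in this branch
      else st) structure0
  let structure2 : PySem.Dict String (List Int) :=
    structure1.keys.foldl (fun st k => st.modify k [] (fun xs => PySem.List.sorted xs (fun x => x))) structure1
  structure2.items

-- ===== PORT B =====
def detect_lyric_structure_alt (lines : List String) : List (String × List Int) :=
  let counts : PySem.Dict String Int :=
    lines.foldl (fun d line =>
      let key := PySem.Str.lower line
      d.insert key (d.getD key 0 + 1)) PySem.Dict.empty
  let st0 : PySem.Dict String (List Int) :=
    ((((PySem.Dict.empty).insert "verse" []).insert "chorus" []).insert "bridge" []).insert "other" []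
  ((PySem.List.enumerate lines).foldl (fun st p =>
      if counts.getD (PySem.Str.lower p.2) 0 ≥ 2 then st.modify "chorus" [] (fun xs => xs ++ [p.1])
      else st.modify "verse" [] (fun xs => xs ++ [p.1])) st0).items

-- ===== PRECONDITION & SPEC =====
def Spec_detect_lyric_structure (lines : List String) (out : List (String × List Int)) : Prop := out = detect_lyric_structure_alt lines
instance (lines : List String) (out : List (String × List Int)) : Decidable (Spec_detect_lyric_structure lines out) := by unfold Spec_detect_lyric_structure; infer_instance

-- ===== CLAIM (what is proved, stated in full; the proofs are below) =====
def Claim_equal_detect_lyric_structure : Prop := ∀ (lines : List String), Dom_detect_lyric_structure lines → Spec_detect_lyric_structure lines (detect_lyric_structure lines)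

-- ===== LEMMAS AND PROOFS =====

-- spec-level abbreviations (proof helpers only)
def lwr (lines : List String) : List String := lines.map PySem.Str.lower

def grp (lines : List String) (k : String) : List Int :=
  ((PySem.List.enumerate lines).filter (fun p => PySem.Str.lower p.2 == k)).map (fun p => p.1)

def ksOf (lines : List String) : List String := PySem.Set.ofList (lwr lines)

def mk4 (v c : List Int) : PySem.Dict String (List Int) :=
  PySem.Dict.mk [("verse", v), ("chorus", c), ("bridge", []), ("other", [])]

def vA (lines : List String) : List Int :=
  ((ksOf lines).filter (fun k => (grp lines k).length == 1)).map (fun k => (grp lines k).headI)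

def cA (lines : List String) : List Int :=
  ((ksOf lines).filter (fun k => decide ((grp lines k).length ≥ 2))).flatMap (grp lines)

def vB (lines : List String) : List Int :=
  ((PySem.List.enumerate lines).filter (fun p => !decide (2 ≤ (lwr lines).count (PySem.Str.lower p.2)))).map (fun p => p.1)

def cB (lines : List String) : List Int :=
  ((PySem.List.enumerate lines).filter (fun p => decide (2 ≤ (lwr lines).count (PySem.Str.lower p.2)))).map (fun p => p.1)

-- mk4 computation lemmas
theorem mk4_modify_chorus (v c : List Int) (f : List Int → List Int) :
    (mk4 v c).modify "chorus" [] f = mk4 v (f c) := rfl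

theorem mk4_modify_verse (v c : List Int) (f : List Int → List Int) :
    (mk4 v c).modify "verse" [] f = mk4 (f v) c := rfl

theorem structure0_eq :
    (((((PySem.Dict.empty).insert "verse" ([] : List Int)).insert "chorus" []).insert "bridge" []).insert "other" []) = mk4 [] [] := by
  decide

-- the conditional-insert-then-append step of A is a plain modify
theorem stepA_eq (d : PySem.Dict String (List Int)) (k : String) (i : Int) :
    (if d.contains k then d else d.insert k ([] : List Int)).modify k [] (fun xs => xs ++ [i])
      = d.modify k [] (fun xs => xs ++ [i]) := by
  by_cases h : d.contains k = true
  · simp [h]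
  · have h' : d.contains k = false := by simpa using h
    simp only [h', Bool.false_eq_true, if_false, PySem.Dict.modify,
      PySem.Dict.getD_insert_self, PySem.Dict.insert_insert_self,
      PySem.Dict.getD_of_not_contains d [] h']

def cdictA (lines : List String) : PySem.Dict String (List Int) :=
  (PySem.List.enumerate lines).foldl
    (fun d p => d.modify (PySem.Str.lower p.2) [] (fun xs => xs ++ [p.1])) PySem.Dict.empty

theorem foldA_eq (lines : List String) :
    (PySem.List.enumerate lines).foldl (fun d p =>
      let ll := PySem.Str.lower p.2
      let d' := if d.contains ll then d else d.insert ll ([] : List Int)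
      d'.modify ll [] (fun xs => xs ++ [p.1])) PySem.Dict.empty = cdictA lines := by
  exact PySem.List.foldl_congr_mem _ _ _ _ (fun acc p _ => stepA_eq acc (PySem.Str.lower p.2) p.1)

theorem map_lower_enumerate (lines : List String) :
    (PySem.List.enumerate lines).map (fun p => PySem.Str.lower p.2) = lwr lines := by
  have h : (PySem.List.enumerate lines).map (fun p => PySem.Str.lower p.2)
      = ((PySem.List.enumerate lines).map (fun p => p.2)).map PySem.Str.lower := by
    rw [List.map_map]; rfl
  rw [h, PySem.List.map_snd_enumerate]; rfl

theorem getD_cdictA (lines : List String) (k : String) :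
    (cdictA lines).getD k [] = grp lines k := by
  unfold cdictA
  have h : (PySem.List.enumerate lines).foldl
      (fun d p => d.modify (PySem.Str.lower p.2) [] (fun xs => xs ++ [p.1])) PySem.Dict.empty
      = ((PySem.List.enumerate lines).map (fun p => (PySem.Str.lower p.2, p.1))).foldl
          (fun d q => d.modify q.1 [] (fun xs => xs ++ [q.2])) PySem.Dict.empty := by
    rw [List.foldl_map]
  rw [h, PySem.Dict.getD_foldl_modify_append, List.filter_map, List.map_map]
  simp [grp, PySem.Dict.getD_empty, Function.comp_def]

theorem keys_cdictA (lines : List String) : (cdictA lines).keys = ksOf lines := by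
  unfold cdictA
  rw [PySem.Dict.keys_foldl_modify_key (PySem.List.enumerate lines)
    (fun p => PySem.Str.lower p.2) [] (fun _ p => (fun xs => xs ++ [p.1])) PySem.Dict.empty]
  rw [PySem.Dict.keys_empty, PySem.Set.update_nil_left, map_lower_enumerate]
  rfl

theorem items_cdictA (lines : List String) :
    (cdictA lines).items = (ksOf lines).map (fun k => (k, grp lines k)) := by
  rw [PySem.Dict.items_eq_map_keys _ (by rw [keys_cdictA]; exact PySem.Set.nodup_ofList _) [],
    keys_cdictA]
  exact List.map_congr_left fun k _ => by rw [getD_cdictA]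

-- A's classification loop over the grouped items
theorem foldA2 (l : List (String × List Int)) (v c : List Int) :
    l.foldl (fun st kv =>
      if kv.2.length ≥ 2 then st.modify "chorus" [] (fun xs => xs ++ kv.2)
      else if kv.2.length = 1 then st.modify "verse" [] (fun xs => xs ++ [kv.2.headI])
      else st) (mk4 v c)
    = mk4 (v ++ (l.filter (fun kv => kv.2.length == 1)).map (fun kv => kv.2.headI))
          (c ++ (l.filter (fun kv => decide (kv.2.length ≥ 2))).flatMap (fun kv => kv.2)) := by
  induction l generalizing v c with
  | nil => simp
  | cons kv t ih =>
    by_cases h2 : kv.2.length ≥ 2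
    · have h1 : (kv.2.length == 1) = false := by simp; omega
      simp only [List.foldl_cons, if_pos h2, mk4_modify_chorus, ih, List.filter_cons, h1,
        decide_eq_true h2, Bool.false_eq_true, if_false, if_true, List.flatMap_cons,
        List.append_assoc]
    · by_cases h1 : kv.2.length = 1
      · have h2' : (decide (kv.2.length ≥ 2)) = false := by simp; omega
        have h1' : (kv.2.length == 1) = true := by simp [h1]
        simp only [List.foldl_cons, if_neg h2, if_pos h1, mk4_modify_verse, ih,
          List.filter_cons, h1', h2', Bool.false_eq_true, if_false, if_true, List.map_cons,
          List.append_assoc, List.cons_append, List.nil_append]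
      · have h2' : (decide (kv.2.length ≥ 2)) = false := by simp; omega
        have h1' : (kv.2.length == 1) = false := by simp [h1]
        simp only [List.foldl_cons, if_neg h2, if_neg h1, ih, List.filter_cons, h1', h2',
          Bool.false_eq_true, if_false]

-- A's final per-key sorting loop, applied to the concrete four-key dict
def sortPass (s1 : PySem.Dict String (List Int)) : List (String × List Int) :=
  (s1.keys.foldl (fun st k => st.modify k [] (fun xs => PySem.List.sorted xs (fun x => x))) s1).items

theorem sortPass_mk4 (v c : List Int) :
    sortPass (mk4 v c) = [("verse", PySem.List.sorted v (fun x => x)),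
      ("chorus", PySem.List.sorted c (fun x => x)), ("bridge", []), ("other", [])] := rfl

theorem A_eq (lines : List String) :
    detect_lyric_structure lines =
      [("verse", PySem.List.sorted (vA lines) (fun x => x)),
       ("chorus", PySem.List.sorted (cA lines) (fun x => x)),
       ("bridge", []), ("other", [])] := by
  have h0 : detect_lyric_structure lines =
      sortPass (((PySem.List.enumerate lines).foldl (fun d p =>
          let ll := PySem.Str.lower p.2
          let d' := if d.contains ll then d else d.insert ll ([] : List Int)
          d'.modify ll [] (fun xs => xs ++ [p.1])) PySem.Dict.empty).items.foldl
        (fun st kv =>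
          if kv.2.length ≥ 2 then st.modify "chorus" [] (fun xs => xs ++ kv.2)
          else if kv.2.length = 1 then st.modify "verse" [] (fun xs => xs ++ [kv.2.headI])
          else st)
        (((((PySem.Dict.empty).insert "verse" ([] : List Int)).insert "chorus" []).insert "bridge" []).insert "other" [])) := rfl
  rw [h0, foldA_eq, structure0_eq, items_cdictA, foldA2, List.filter_map, List.filter_map,
    List.map_map, List.flatMap_map, sortPass_mk4]
  simp only [vA, cA, Function.comp_def, List.nil_append]

-- B's counting loop is Counter(lowered lines)
theorem countsB_eq (lines : List String) :
    lines.foldl (fun d line =>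
      let key := PySem.Str.lower line
      d.insert key (d.getD key 0 + 1)) (PySem.Dict.empty : PySem.Dict String Int)
      = PySem.Dict.counter (lwr lines) := by
  have h : lines.foldl (fun d line =>
      let key := PySem.Str.lower line
      d.insert key (d.getD key 0 + 1)) (PySem.Dict.empty : PySem.Dict String Int)
      = (lwr lines).foldl (fun d x => d.insert x (d.getD x 0 + 1)) PySem.Dict.empty := by
    unfold lwr; rw [List.foldl_map]
  exact h.trans (PySem.Dict.foldl_insert_getD_add_one_eq_counter _)

-- B's classification loop
theorem foldB2 (lines : List String) (l : List (Int × String)) (v c : List Int) :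
    l.foldl (fun st p =>
      if (PySem.Dict.counter (lwr lines)).getD (PySem.Str.lower p.2) 0 ≥ 2 then
        st.modify "chorus" [] (fun xs => xs ++ [p.1])
      else st.modify "verse" [] (fun xs => xs ++ [p.1])) (mk4 v c)
    = mk4 (v ++ (l.filter (fun p => !decide (2 ≤ (lwr lines).count (PySem.Str.lower p.2)))).map (fun p => p.1))
          (c ++ (l.filter (fun p => decide (2 ≤ (lwr lines).count (PySem.Str.lower p.2)))).map (fun p => p.1)) := by
  induction l generalizing v c with
  | nil => simp
  | cons p t ih =>
    have hc : ((PySem.Dict.counter (lwr lines)).getD (PySem.Str.lower p.2) 0 ≥ 2)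
        ↔ 2 ≤ (lwr lines).count (PySem.Str.lower p.2) := by
      rw [PySem.Dict.getD_counter]; exact_mod_cast Iff.rfl
    by_cases h : 2 ≤ (lwr lines).count (PySem.Str.lower p.2)
    · simp only [List.foldl_cons, if_pos (hc.mpr h), mk4_modify_chorus, ih, List.filter_cons,
        decide_eq_true h, Bool.not_true, Bool.false_eq_true, if_false, if_true, List.map_cons,
        List.append_assoc, List.cons_append, List.nil_append]
    · simp only [List.foldl_cons, if_neg (fun hh => h (hc.mp hh)), mk4_modify_verse, ih,
        List.filter_cons, decide_eq_false h, Bool.not_false, Bool.false_eq_true, if_false,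
        if_true, List.map_cons, List.append_assoc, List.cons_append, List.nil_append]

theorem B_eq (lines : List String) :
    detect_lyric_structure_alt lines =
      [("verse", vB lines), ("chorus", cB lines), ("bridge", []), ("other", [])] := by
  have h0 : detect_lyric_structure_alt lines =
      ((PySem.List.enumerate lines).foldl (fun st p =>
        if (lines.foldl (fun d line =>
              let key := PySem.Str.lower line
              d.insert key (d.getD key 0 + 1)) (PySem.Dict.empty : PySem.Dict String Int)).getD
            (PySem.Str.lower p.2) 0 ≥ 2 then
          st.modify "chorus" [] (fun xs => xs ++ [p.1])
        else st.modify "verse" [] (fun xs => xs ++ [p.1]))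
        (((((PySem.Dict.empty).insert "verse" ([] : List Int)).insert "chorus" []).insert "bridge" []).insert "other" [])).items := rfl
  rw [h0, countsB_eq, structure0_eq, foldB2]
  rfl

-- membership in a group
theorem mem_grp (lines : List String) (k : String) (i : Int) :
    i ∈ grp lines k ↔ ∃ j : Nat, ∃ _ : j < lines.length, i = (j : Int) ∧ PySem.Str.lower lines[j] = k := by
  simp only [grp, List.mem_map, List.mem_filter, PySem.List.mem_enumerate_iff]
  constructor
  · rintro ⟨p, ⟨⟨j, hj, rfl⟩, hk⟩, rfl⟩
    exact ⟨j, hj, by simp, by simpa using hk⟩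
  · rintro ⟨j, hj, rfl, hk⟩
    exact ⟨((j : Int), lines[j]), ⟨⟨j, hj, by simp⟩, by simpa using hk⟩, rfl⟩

theorem grp_pairwise (lines : List String) (k : String) :
    (grp lines k).Pairwise (· < ·) := by
  unfold grp
  rw [List.pairwise_map]
  exact ((PySem.List.pairwise_lt_enumerate lines 0).filter _)

theorem length_grp (lines : List String) (k : String) :
    (grp lines k).length = (lwr lines).count k := by
  unfold grp lwr
  rw [List.length_map, ← List.countP_eq_length_filter]
  have hl : (PySem.List.enumerate lines).countP (fun p => PySem.Str.lower p.2 == k)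
      = ((PySem.List.enumerate lines).map (fun p => p.2)).countP (fun x => PySem.Str.lower x == k) := by
    rw [List.countP_map]; rfl
  have hr : List.count k (lines.map PySem.Str.lower) = lines.countP (fun x => PySem.Str.lower x == k) := by
    rw [List.count_eq_countP, List.countP_map]; rfl
  rw [hl, PySem.List.map_snd_enumerate, hr]

theorem perm_part (lines : List String) (P : String → Bool) :
    (((PySem.List.enumerate lines).filter (fun p => P (PySem.Str.lower p.2))).map (fun p => p.1)).Perm
      (((ksOf lines).filter P).flatMap (grp lines)) := by
  have ndR : (((PySem.List.enumerate lines).filter (fun p => P (PySem.Str.lower p.2))).map (fun p => p.1)).Nodup := by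
    refine List.Pairwise.imp (fun h => ne_of_lt h) ?_
    rw [List.pairwise_map]
    exact ((PySem.List.pairwise_lt_enumerate lines 0).filter _)
  have ndL : ((((ksOf lines).filter P)).flatMap (grp lines)).Nodup := by
    rw [List.nodup_flatMap]
    refine ⟨fun k _ => List.Pairwise.imp (fun h => ne_of_lt h) (grp_pairwise lines k), ?_⟩
    refine List.Pairwise.imp ?_ (((PySem.Set.nodup_ofList (lwr lines)).filter P))
    intro k k' hne i hik hik'
    rcases (mem_grp lines k i).mp hik with ⟨j, hj, hij, hkj⟩
    rcases (mem_grp lines k' i).mp hik' with ⟨j', hj', hij', hkj'⟩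
    have hjj : j = j' := by
      have hc : (j : Int) = (j' : Int) := by rw [← hij, ← hij']
      exact_mod_cast hc
    subst hjj
    apply hne
    rw [← hkj, ← hkj']
  refine (List.perm_ext_iff_of_nodup ndR ndL).mpr ?_
  intro a
  simp only [List.mem_map, List.mem_filter, List.mem_flatMap, PySem.List.mem_enumerate_iff]
  constructor
  · rintro ⟨p, ⟨⟨j, hj, rfl⟩, hP⟩, rfl⟩
    refine ⟨PySem.Str.lower lines[j], ⟨?_, by simpa using hP⟩, ?_⟩
    · exact (PySem.Set.mem_ofList _ _).mpr (by exact List.mem_map_of_mem (List.getElem_mem hj))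
    · exact (mem_grp lines _ _).mpr ⟨j, hj, by simp, rfl⟩
  · rintro ⟨k, ⟨hk, hP⟩, ha⟩
    rcases (mem_grp lines k _).mp ha with ⟨j, hj, rfl, hkj⟩
    exact ⟨((j : Int), lines[j]), ⟨⟨j, hj, by simp⟩, by rw [hkj]; exact hP⟩, rfl⟩

theorem sorted_part (lines : List String) (P : String → Bool) :
    PySem.List.sorted (((ksOf lines).filter P).flatMap (grp lines)) (fun x => x)
      = ((PySem.List.enumerate lines).filter (fun p => P (PySem.Str.lower p.2))).map (fun p => p.1) :=
  PySem.List.sorted_eq_of_perm_of_pairwise_lt _ _ _ (perm_part lines P)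
    (by refine ?_
        rw [List.pairwise_map]
        exact ((PySem.List.pairwise_lt_enumerate lines 0).filter _))

theorem chorus_eq (lines : List String) :
    PySem.List.sorted (cA lines) (fun x => x) = cB lines := by
  have hfc : ((ksOf lines).filter (fun k => decide ((grp lines k).length ≥ 2)))
      = ((ksOf lines).filter (fun k => decide (2 ≤ (lwr lines).count k))) := by
    refine List.filter_congr ?_
    intro k _
    rw [length_grp]
  rw [cA, hfc, sorted_part]
  rfl

theorem vA_flat (lines : List String) :
    vA lines = ((ksOf lines).filter (fun k => (grp lines k).length == 1)).flatMap (grp lines) := by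
  unfold vA
  have h : ∀ l : List String, (∀ k ∈ l, (grp lines k).length = 1) →
      l.map (fun k => (grp lines k).headI) = l.flatMap (grp lines) := by
    intro l
    induction l with
    | nil => intro _; rfl
    | cons k t ih =>
      intro hmem
      rcases List.length_eq_one_iff.mp (hmem k List.mem_cons_self) with ⟨x, hx⟩
      simp only [List.map_cons, List.flatMap_cons, hx, List.singleton_append]
      rw [ih (fun k' hk' => hmem k' (List.mem_cons_of_mem _ hk'))]
      rfl
  refine h _ ?_
  intro k hk
  simpa using (List.mem_filter.mp hk).2

theorem verse_eq (lines : List String) :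
    PySem.List.sorted (vA lines) (fun x => x) = vB lines := by
  rw [vA_flat]
  have hfc : ((ksOf lines).filter (fun k => (grp lines k).length == 1))
      = ((ksOf lines).filter (fun k => decide ((lwr lines).count k = 1))) := by
    refine List.filter_congr ?_
    intro k _
    rw [Bool.eq_iff_iff]
    simp only [beq_iff_eq, decide_eq_true_eq, length_grp]
  rw [hfc, sorted_part]
  unfold vB
  congr 1
  refine List.filter_congr ?_
  intro p hp
  rcases (PySem.List.mem_enumerate_iff _ _ _).mp hp with ⟨j, hj, rfl⟩
  have hmem : PySem.Str.lower lines[j] ∈ lwr lines :=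
    List.mem_map_of_mem (List.getElem_mem hj)
  have hpos : 1 ≤ (lwr lines).count (PySem.Str.lower lines[j]) := List.count_pos_iff.mpr hmem
  rw [Bool.eq_iff_iff]
  simp only [decide_eq_true_eq, Bool.not_eq_true', decide_eq_false_iff_not]
  omega

theorem detect_lyric_structure_main (lines : List String) :
    detect_lyric_structure lines = detect_lyric_structure_alt lines := by
  rw [A_eq, B_eq, chorus_eq, verse_eq]

-- ===== VERDICT (by name: the statement is the Claim_ definition above) =====
theorem detect_lyric_structure_spec : Claim_equal_detect_lyric_structure := by
  intro lines _
  unfold Spec_detect_lyric_structure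
  exact detect_lyric_structure_main lines
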